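-- pv_equiv track=rewrite | github.com/vannguyennd/can | units_start_end.py | start_end_targets_2
-- ===== SOURCE A (Python) =====
-- def start_end_targets_2(p_target_combine):
--     flag_start = False
--     c_start = []
--     c_end = []
--     for i in range(len(p_target_combine)):
--         if flag_start is False:
--             if p_target_combine[i] == '2':
--                 c_start.append(i)
--                 c_end.append(i)
--             elif p_target_combine[i] == '0':
--                 c_start.append(i)
--                 flag_start = True
--         else:
--             if p_target_combine[i] == '2':
--                 c_end.append(i)
--                 flag_start = False
--
--     if len(c_start) == len(c_end) + 1:
--         return c_start[:-1], c_end
--     else: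
--         return c_start, c_end
-- ===== SOURCE B (Python) =====
-- def start_end_targets_2(p_target_combine):
--     # Staged approach: first collect the index lists of all '2' labels (these are
--     # exactly the emitted ends) and all '0' labels, then pair each end with the
--     # earliest not-yet-consumed '0' before it (by a two-pointer merge); an end
--     # with no available '0' is a zero-length pair, a leftover '0' is dropped.
--     twos = [i for i, x in enumerate(p_target_combine) if x == '2']
--     zeros = [i for i, x in enumerate(p_target_combine) if x == '0']
--     c_start = []
--     prev = -1
--     for j in twos:
--         while zeros and zeros[0] <= prev:
--             zeros.pop(0)
--         c_start.append(zeros[0] if zeros and zeros[0] < j else j)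
--         prev = j
--     return c_start, twos
-- ===== Notes on version B (the rewrite author's own statement) =====
-- stated objective: alternative
-- what changed: B replaces A's one-pass boolean state machine with post-loop trim by staged passes: it first builds the index lists of all '2' labels (the ends) and all '0' labels, then pairs each end with the earliest unconsumed preceding '0' via a two-pointer merge; a dangling open start is never emitted, so the len(c_start)==len(c_end)+1 trim disappears.
import Mathlib
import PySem

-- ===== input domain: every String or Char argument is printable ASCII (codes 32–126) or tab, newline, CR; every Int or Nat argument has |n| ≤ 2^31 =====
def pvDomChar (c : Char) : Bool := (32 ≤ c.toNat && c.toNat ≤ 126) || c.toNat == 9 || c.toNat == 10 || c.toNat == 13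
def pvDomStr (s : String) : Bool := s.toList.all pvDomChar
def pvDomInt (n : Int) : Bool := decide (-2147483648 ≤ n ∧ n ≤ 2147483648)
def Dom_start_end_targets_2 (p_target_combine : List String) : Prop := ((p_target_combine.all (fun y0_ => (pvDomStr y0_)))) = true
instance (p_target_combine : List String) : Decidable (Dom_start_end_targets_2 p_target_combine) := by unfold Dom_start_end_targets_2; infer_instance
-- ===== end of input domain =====

-- B replaces A's single-pass flag machine + post-loop trim by staged passes: collect the
-- '2'-index and '0'-index lists, then pair them with a two-pointer merge (objective: alternative).


-- ===== PORT A =====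
-- loop body of A (state: flag_start, c_start, c_end; input: (i, p_target_combine[i]))
def pvStepA (st : Bool × List Int × List Int) (ix : Int × String) : Bool × List Int × List Int :=
  if st.1 = false then
    if ix.2 = "2" then (st.1, st.2.1 ++ [ix.1], st.2.2 ++ [ix.1])
    else if ix.2 = "0" then (true, st.2.1 ++ [ix.1], st.2.2)
    else st
  else
    if ix.2 = "2" then (false, st.2.1, st.2.2 ++ [ix.1])
    else st

def start_end_targets_2 (p_target_combine : List String) : List Int × List Int :=
  -- for i in range(len(p)): … p[i] …  (index always in range, so pyGetD is exact)
  let st := (PySem.List.pyRange 0 (PySem.List.len p_target_combine) 1).foldl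
    (fun st i => pvStepA st (i, PySem.List.pyGetD p_target_combine i "")) (false, [], [])
  if PySem.List.len st.2.1 = PySem.List.len st.2.2 + 1 then
    (PySem.List.slice st.2.1 none (some (-1)), st.2.2)
  else
    (st.2.1, st.2.2)

-- ===== PORT B =====
-- while zeros and zeros[0] <= prev: zeros.pop(0)
def pvDropLe (zeros : List Int) (prev : Int) : List Int :=
  match zeros with
  | [] => []
  | z :: rest => if z ≤ prev then pvDropLe rest prev else z :: rest

-- body of B's 'for j in twos' loop (state: c_start, zeros, prev)
def pvStepB (st : List Int × List Int × Int) (j : Int) : List Int × List Int × Int :=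
  let zs := pvDropLe st.2.1 st.2.2
  (st.1 ++ [match zs with | z :: _ => if z < j then z else j | [] => j], zs, j)

def start_end_targets_2_alt (p_target_combine : List String) : List Int × List Int :=
  let twos := ((PySem.List.enumerate p_target_combine 0).filter (fun ix => ix.2 = "2")).map Prod.fst
  let zeros := ((PySem.List.enumerate p_target_combine 0).filter (fun ix => ix.2 = "0")).map Prod.fst
  let st := twos.foldl pvStepB ([], zeros, -1)
  (st.1, twos)

-- ===== PRECONDITION & SPEC =====
def Spec_start_end_targets_2 (p_target_combine : List String) (out : List Int × List Int) : Prop := out = start_end_targets_2_alt p_target_combine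
instance (p_target_combine : List String) (out : List Int × List Int) : Decidable (Spec_start_end_targets_2 p_target_combine out) := by unfold Spec_start_end_targets_2; infer_instance

-- ===== CLAIM (what is proved, stated in full; the proofs are below) =====
def Claim_equal_start_end_targets_2 : Prop := ∀ (p_target_combine : List String), Dom_start_end_targets_2 p_target_combine → Spec_start_end_targets_2 p_target_combine (start_end_targets_2 p_target_combine)

-- ===== LEMMAS AND PROOFS =====

-- reference: pairs emitted with pending start, plus the final pending (cons-style)
def pvSpecP : List (Int × String) → Option Int → (List Int × List Int) × Option Int
  | [], pd => (([], []), pd)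
  | (i, x) :: r, pd =>
    if x = "2" then
      (((pd.getD i) :: (pvSpecP r none).1.1, i :: (pvSpecP r none).1.2), (pvSpecP r none).2)
    else if x = "0" ∧ pd = none then pvSpecP r (some i)
    else pvSpecP r pd

def pvTwosL (l : List (Int × String)) : List Int := (l.filter (fun p => p.2 = "2")).map Prod.fst
def pvZerosL (l : List (Int × String)) : List Int := (l.filter (fun p => p.2 = "0")).map Prod.fst

-- cons-style version of B's pairing loop
def pvBloop : List Int → List Int → Int → List Int
  | [], _, _ => []
  | j :: tw, zeros, prev =>
    (match pvDropLe zeros prev with | z :: _ => if z < j then z else j | [] => j)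
      :: pvBloop tw (pvDropLe zeros prev) j

-- B's foldl accumulates pvBloop's cons-list
lemma pvFoldB_eq_bloop : ∀ (tw : List Int) (s zeros : List Int) (prev : Int),
    (tw.foldl pvStepB (s, zeros, prev)).1 = s ++ pvBloop tw zeros prev := by
  intro tw
  induction tw with
  | nil => intro s zeros prev; simp [pvBloop]
  | cons j tl ih =>
    intro s zeros prev
    simp only [List.foldl_cons, pvStepB, pvBloop]
    rw [ih]
    simp

lemma pvDropLe_append_le {a : List Int} {prev : Int} (h : ∀ w ∈ a, w ≤ prev) (b : List Int) :
    pvDropLe (a ++ b) prev = pvDropLe b prev := by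
  induction a with
  | nil => simp
  | cons x xs ih =>
    simp only [List.cons_append, pvDropLe]
    rw [if_pos (h x (by simp))]
    exact ih (fun w hw => h w (by simp [hw]))

lemma pvDropLe_all_gt {b : List Int} {prev : Int} (h : ∀ w ∈ b, prev < w) :
    pvDropLe b prev = b := by
  cases b with
  | nil => rfl
  | cons z rest => simp only [pvDropLe]; rw [if_neg (by have := h z (by simp); omega)]

-- A's loop, run from a state whose c_start already holds the pending start,
-- computes pvSpecP's pairs plus the dangling pending start.
lemma pvFoldA_eq_specP : ∀ (l : List (Int × String)) (v? : Option Int) (s e : List Int),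
    l.foldl pvStepA (v?.isSome, s ++ v?.toList, e)
      = ((pvSpecP l v?).2.isSome,
         s ++ (pvSpecP l v?).1.1 ++ (pvSpecP l v?).2.toList,
         e ++ (pvSpecP l v?).1.2) := by
  intro l
  induction l with
  | nil => intro v? s e; cases v? <;> simp [pvSpecP]
  | cons hd tl ih =>
    intro v? s e
    obtain ⟨i, x⟩ := hd
    simp only [List.foldl_cons]
    by_cases h2 : x = "2"
    · cases v? with
      | none =>
        have := ih none (s ++ [i]) (e ++ [i])
        simpa [pvStepA, pvSpecP, h2] using this
      | some v =>
        have := ih none (s ++ [v]) (e ++ [i])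
        simpa [pvStepA, pvSpecP, h2] using this
    · by_cases h0 : x = "0"
      · cases v? with
        | none =>
          have := ih (some i) s e
          simpa [pvStepA, pvSpecP, h2, h0] using this
        | some v =>
          have := ih (some v) s e
          simpa [pvStepA, pvSpecP, h2, h0] using this
      · cases v? with
        | none =>
          have := ih none s e
          simpa [pvStepA, pvSpecP, h2, h0] using this
        | some v =>
          have := ih (some v) s e
          simpa [pvStepA, pvSpecP, h2, h0] using this

lemma pvSpecP_len : ∀ (l : List (Int × String)) (pd : Option Int),
    (pvSpecP l pd).1.1.length = (pvSpecP l pd).1.2.length := by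
  intro l
  induction l with
  | nil => intro pd; rfl
  | cons hd tl ih =>
    intro pd
    obtain ⟨i, x⟩ := hd
    by_cases h2 : x = "2"
    · simp [pvSpecP, h2, ih]
    · by_cases h0 : x = "0"
      · cases pd <;> simp [pvSpecP, h2, h0, ih]
      · simp [pvSpecP, h2, h0, ih]

lemma pvSpecP_ends : ∀ (l : List (Int × String)) (pd : Option Int),
    (pvSpecP l pd).1.2 = pvTwosL l := by
  intro l
  induction l with
  | nil => intro pd; rfl
  | cons hd tl ih =>
    intro pd
    obtain ⟨i, x⟩ := hd
    by_cases h2 : x = "2"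
    · simp [pvSpecP, pvTwosL, h2, ih, List.filter]
    · by_cases h0 : x = "0"
      · cases pd <;> simp [pvSpecP, pvTwosL, h2, h0, ih, List.filter]
      · simp [pvSpecP, pvTwosL, h2, h0, ih, List.filter]

lemma pvZerosL_mem {l : List (Int × String)} {w : Int} (h : w ∈ pvZerosL l) :
    ∃ q ∈ l, q.1 = w := by
  unfold pvZerosL at h
  obtain ⟨q, hq, rfl⟩ := List.mem_map.mp h
  exact ⟨q, (List.mem_filter.mp hq).1, rfl⟩

-- main invariant: B's pairing loop computes pvSpecP's starts, both from the
-- closed state (junk of consumed zeros in front) and from the open state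
-- (pending start v plus ignored zeros zs in front).
lemma pvMain : ∀ (l : List (Int × String)),
    List.Pairwise (fun a b => a.1 < b.1) l →
    ((∀ prev junk, (∀ w ∈ junk, w ≤ prev) → (∀ q ∈ l, prev < q.1) →
        pvBloop (pvTwosL l) (junk ++ pvZerosL l) prev = (pvSpecP l none).1.1)
    ∧ (∀ prev junk v zs, (∀ w ∈ junk, w ≤ prev) → (∀ q ∈ l, prev < q.1) →
        prev < v → (∀ q ∈ l, v < q.1) → (∀ w ∈ zs, ∀ q ∈ l, w < q.1) →
        pvBloop (pvTwosL l) (junk ++ v :: (zs ++ pvZerosL l)) prev = (pvSpecP l (some v)).1.1)) := by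
  intro l
  induction l with
  | nil =>
    intro _
    constructor
    · intro prev junk _ _; simp [pvTwosL, pvZerosL, pvBloop, pvSpecP]
    · intro prev junk v zs _ _ _ _ _; simp [pvTwosL, pvZerosL, pvBloop, pvSpecP]
  | cons hd tl ih =>
    intro hpw
    obtain ⟨i, x⟩ := hd
    have hpwtl := (List.pairwise_cons.mp hpw).2
    have hhd : ∀ q ∈ tl, i < q.1 := (List.pairwise_cons.mp hpw).1
    obtain ⟨ih1, ih2⟩ := ih hpwtl
    constructor
    · -- closed state
      intro prev junk hjunk hgt
      by_cases h2 : x = "2"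
      · -- twos = i :: twos tl, zeros = zeros tl
        have hz : ∀ w ∈ pvZerosL tl, prev < w := by
          intro w hw; obtain ⟨q, hq, rfl⟩ := pvZerosL_mem hw; exact hgt q (by simp [hq])
        have hdrop : pvDropLe (junk ++ pvZerosL tl) prev = pvZerosL tl := by
          rw [pvDropLe_append_le hjunk, pvDropLe_all_gt hz]
        have hi : prev < i := hgt (i, x) (by simp)
        have htw : pvTwosL ((i, x) :: tl) = i :: pvTwosL tl := by
          simp [pvTwosL, List.filter, h2]
        have harg : pvZerosL ((i, x) :: tl) = pvZerosL tl := by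
          simp [pvZerosL, List.filter, h2]
        rw [htw, harg]
        simp only [pvBloop]
        rw [hdrop]
        have hcase : (match pvZerosL tl with | z :: _ => if z < i then z else i | [] => i) = i := by
          cases hzt : pvZerosL tl with
          | nil => rfl
          | cons z rest =>
            have : i < z := by
              obtain ⟨q, hq, rfl⟩ := pvZerosL_mem (by rw [hzt]; exact List.mem_cons_self ..)
              exact hhd q hq
            simp; omega
        rw [hcase]
        have := ih1 i [] (by simp) hhd
        simp only [List.nil_append] at this
        rw [this]
        simp [pvSpecP, h2]
      · by_cases h0 : x = "0"
        · -- zeros = i :: zeros tl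
          have hi : prev < i := hgt (i, x) (by simp)
          have harg : pvZerosL ((i, x) :: tl) = i :: pvZerosL tl := by
            simp [pvZerosL, List.filter, h0]
          have htw : pvTwosL ((i, x) :: tl) = pvTwosL tl := by
            simp [pvTwosL, List.filter, h2]
          rw [harg, htw]
          have := ih2 prev junk i [] hjunk (fun q hq => hgt q (by simp [hq])) hi hhd (by simp)
          simp only [List.nil_append] at this
          rw [this]
          simp [pvSpecP, h2, h0]
        · have harg : pvZerosL ((i, x) :: tl) = pvZerosL tl := by
            simp [pvZerosL, List.filter, h0, h2]
          have htw : pvTwosL ((i, x) :: tl) = pvTwosL tl := by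
            simp [pvTwosL, List.filter, h0, h2]
          rw [harg, htw, ih1 prev junk hjunk (fun q hq => hgt q (by simp [hq]))]
          simp [pvSpecP, h2, h0]
    · -- open state with pending v
      intro prev junk v zs hjunk hgt hpv hvlt hzs
      by_cases h2 : x = "2"
      · have hvi : v < i := hvlt (i, x) (by simp)
        have htw : pvTwosL ((i, x) :: tl) = i :: pvTwosL tl := by
          simp [pvTwosL, List.filter, h2]
        have harg : pvZerosL ((i, x) :: tl) = pvZerosL tl := by
          simp [pvZerosL, List.filter, h2]
        rw [htw, harg]
        simp only [pvBloop]
        have hdrop : pvDropLe (junk ++ v :: (zs ++ pvZerosL tl)) prev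
            = v :: (zs ++ pvZerosL tl) := by
          rw [pvDropLe_append_le hjunk]
          simp only [pvDropLe]; rw [if_neg (by omega)]
        rw [hdrop]
        simp only [if_pos hvi]
        have := ih1 i (v :: zs)
          (by intro w hw
              rcases List.mem_cons.mp hw with h | h
              · omega
              · have := hzs w h (i, x) (by simp); omega)
          hhd
        simp only [List.cons_append] at this
        rw [this]
        simp [pvSpecP, h2]
      · by_cases h0 : x = "0"
        · have htw : pvTwosL ((i, x) :: tl) = pvTwosL tl := by
            simp [pvTwosL, List.filter, h0, h2]
          have harg : pvZerosL ((i, x) :: tl) = i :: pvZerosL tl := by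
            simp [pvZerosL, List.filter, h0, h2]
          rw [htw, harg]
          have := ih2 prev junk v (zs ++ [i]) hjunk (fun q hq => hgt q (by simp [hq])) hpv
            (fun q hq => hvlt q (by simp [hq]))
            (by intro w hw q hq
                rcases List.mem_append.mp hw with h | h
                · exact hzs w h q (by simp [hq])
                · simp at h; subst h; exact hhd q hq)
          simp only [List.append_assoc, List.singleton_append] at this
          rw [this]
          simp [pvSpecP, h2, h0]
        · have htw : pvTwosL ((i, x) :: tl) = pvTwosL tl := by
            simp [pvTwosL, List.filter, h0, h2]
          have harg : pvZerosL ((i, x) :: tl) = pvZerosL tl := by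
            simp [pvZerosL, List.filter, h0, h2]
          rw [htw, harg, ih2 prev junk v zs hjunk (fun q hq => hgt q (by simp [hq])) hpv
            (fun q hq => hvlt q (by simp [hq]))
            (fun w hw q hq => hzs w hw q (by simp [hq]))]
          simp [pvSpecP, h2, h0]

-- ===== VERDICT (by name: the statement is the Claim_ definition above) =====
theorem start_end_targets_2_spec : Claim_equal_start_end_targets_2 := by
  intro p _
  unfold Spec_start_end_targets_2 start_end_targets_2 start_end_targets_2_alt
  have hA : ((PySem.List.pyRange 0 (PySem.List.len p) 1).foldl
      (fun st i => pvStepA st (i, PySem.List.pyGetD p i "")) ((false, [], []) : Bool × List Int × List Int))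
      = (PySem.List.enumerate p 0).foldl pvStepA (false, [], []) := by
    rw [PySem.List.enumerate_eq_map_pyRange (d := ""), List.foldl_map]
  rw [hA]
  set l := PySem.List.enumerate p 0 with hl
  have hfoldA := pvFoldA_eq_specP l none [] []
  simp only [Option.isSome_none, Option.toList_none, List.append_nil, List.nil_append] at hfoldA
  rw [hfoldA]
  -- B side
  have hpw : List.Pairwise (fun a b => a.1 < b.1) l := PySem.List.pairwise_lt_enumerate p 0
  have hgt : ∀ q ∈ l, (-1 : Int) < q.1 := by
    intro q hq
    obtain ⟨k, hk, rfl⟩ := (PySem.List.mem_enumerate_iff _ _ _).mp hq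
    simp; omega
  have hB := (pvMain l hpw).1 (-1) [] (by simp) hgt
  simp only [List.nil_append] at hB
  have hBfold := pvFoldB_eq_bloop (pvTwosL l) [] (pvZerosL l) (-1)
  simp only [List.nil_append] at hBfold
  have htwdef : ((l.filter (fun ix => ix.2 = "2")).map Prod.fst) = pvTwosL l := rfl
  have hzdef : ((l.filter (fun ix => ix.2 = "0")).map Prod.fst) = pvZerosL l := rfl
  simp only [htwdef, hzdef]
  rw [hBfold, hB]
  have hends := pvSpecP_ends l none
  have hlen := pvSpecP_len l none
  cases hq : (pvSpecP l none).2 with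
  | none =>
    simp only [hq, Option.toList_none, List.append_nil]
    rw [if_neg]
    · rw [hends]
    · simp only [PySem.List.len_eq, hlen]; omega
  | some v =>
    simp only [hq, Option.toList_some]
    rw [if_pos, PySem.List.slice_to_neg_one]
    · rw [List.dropLast_concat, hends]
    · simp only [PySem.List.len_eq, List.length_append, List.length_singleton, hlen]
      push_cast; ring
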